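-- pv_equiv track=rewrite | github.com/aiartman/nonurnwriter | helpers/email_parser.py | parse_followup_email
-- ===== SOURCE A (Python) =====
-- def parse_followup_email(email_content):
--     # Split the email content by lines
--     lines = email_content.strip().split('\n')
--
--     # Initialize variables
--     body_lines = []
--     body_started = False
--
--     for line in lines:
--         line = line.strip()
--
--         # Skip the header if present
--         if line.endswith(':') and not body_started:
--             continue
--
--         # Check if this line starts the actual email body
--         if (line.startswith("Hey") or line.startswith("Hi")) and not body_started:
--             body_started = True
--
--         # If we've started the body, add all subsequent lines
--         if body_started:
--             body_lines.append(line)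
--
--     # Join the body lines
--     body = '\n'.join(body_lines).strip()
--
--     return body
-- ===== SOURCE B (Python) =====
-- def parse_followup_email(email_content):
--     lines = [ln.strip() for ln in email_content.strip().split('\n')]
--     start = next((i for i, ln in enumerate(lines)
--                   if (ln.startswith("Hey") or ln.startswith("Hi")) and not ln.endswith(':')),
--                  None)
--     if start is None:
--         return ''
--     return '\n'.join(lines[start:]).strip()
-- ===== Notes on version B (the rewrite author's own statement) =====
-- stated objective: simpler
-- what changed: Replaced A's single accumulator-flag loop with a two-phase decomposition: strip the lines once, find the index of the first body-starting line (starts with 'Hey'/'Hi' and does not end with ':'), then join the tail slice; no flag or accumulator list.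
import Mathlib
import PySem

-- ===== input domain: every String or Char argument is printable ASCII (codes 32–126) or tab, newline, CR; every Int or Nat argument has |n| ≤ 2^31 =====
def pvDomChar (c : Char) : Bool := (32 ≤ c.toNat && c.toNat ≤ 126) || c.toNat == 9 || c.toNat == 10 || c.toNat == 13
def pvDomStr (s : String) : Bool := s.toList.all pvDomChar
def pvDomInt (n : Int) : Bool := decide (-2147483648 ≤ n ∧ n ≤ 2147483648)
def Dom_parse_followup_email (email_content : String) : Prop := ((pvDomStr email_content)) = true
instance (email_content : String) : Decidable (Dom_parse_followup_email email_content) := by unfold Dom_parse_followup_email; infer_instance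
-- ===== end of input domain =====

-- B finds the first body-start line and joins the tail slice, instead of A's flag+accumulator loop (objective: simpler).

-- ===== PORT A =====
-- one step of A's loop: state = (body_lines, body_started)
def pvStepA (s : List String × Bool) (line0 : String) : List String × Bool :=
  let line := PySem.Str.strip line0
  if PySem.Str.endswith line ":" && !s.2 then s
  else
    let started :=
      if (PySem.Str.startswith line "Hey" || PySem.Str.startswith line "Hi") && !s.2 then true
      else s.2
    if started then (s.1 ++ [line], started) else (s.1, started)

def parse_followup_email (email_content : String) : String :=
  let lines := ((PySem.Str.split? (PySem.Str.strip email_content) "\n").getD [])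
  let st := lines.foldl pvStepA ([], false)
  PySem.Str.strip (PySem.Str.join "\n" st.1)

-- ===== PORT B =====
-- the body-start predicate of Source B
def pvStartsBody (ln : String) : Bool :=
  (PySem.Str.startswith ln "Hey" || PySem.Str.startswith ln "Hi") && !PySem.Str.endswith ln ":"

def parse_followup_email_alt (email_content : String) : String :=
  let lines := (((PySem.Str.split? (PySem.Str.strip email_content) "\n").getD [])).map PySem.Str.strip
  match lines.findIdx? pvStartsBody with
  | none => ""
  | some i => PySem.Str.strip (PySem.Str.join "\n" (lines.drop i))

-- ===== PRECONDITION & SPEC =====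
def Spec_parse_followup_email (email_content : String) (out : String) : Prop := out = parse_followup_email_alt email_content
instance (email_content : String) (out : String) : Decidable (Spec_parse_followup_email email_content out) := by unfold Spec_parse_followup_email; infer_instance

-- ===== CLAIM (what is proved, stated in full; the proofs are below) =====
def Claim_equal_parse_followup_email : Prop := ∀ (email_content : String), Dom_parse_followup_email email_content → Spec_parse_followup_email email_content (parse_followup_email email_content)

-- ===== LEMMAS AND PROOFS =====

-- once started, A's loop appends every (stripped) line
theorem pvFoldA_started (L : List String) (acc : List String) :
    L.foldl pvStepA (acc, true) = (acc ++ L.map PySem.Str.strip, true) := by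
  induction L generalizing acc with
  | nil => simp
  | cons ln L ih =>
      simp only [List.foldl_cons, List.map_cons]
      have hstep : pvStepA (acc, true) ln = (acc ++ [PySem.Str.strip ln], true) := by
        simp only [pvStepA, Bool.not_true, Bool.and_false, Bool.false_eq_true, if_false,
          Bool.false_and, if_true]
      rw [hstep, ih]
      simp

-- A's loop from the initial state computes the tail slice at the first body-start line
theorem pvFoldA_notStarted (L : List String) :
    L.foldl pvStepA ([], false) =
      match (L.map PySem.Str.strip).findIdx? pvStartsBody with
      | none => (([] : List String), false)
      | some i => ((L.map PySem.Str.strip).drop i, true) := by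
  induction L with
  | nil => simp
  | cons ln L ih =>
      simp only [List.foldl_cons, List.map_cons, List.findIdx?_cons]
      by_cases hp : pvStartsBody (PySem.Str.strip ln) = true
      · have hends : PySem.Str.endswith (PySem.Str.strip ln) ":" = false := by
          rcases Bool.and_eq_true .. |>.mp hp with ⟨_, h2⟩
          simpa using h2
        have hstarts : (PySem.Str.startswith (PySem.Str.strip ln) "Hey"
            || PySem.Str.startswith (PySem.Str.strip ln) "Hi") = true := by
          rcases Bool.and_eq_true .. |>.mp hp with ⟨h1, _⟩
          exact h1
        have hstep : pvStepA ([], false) ln = ([PySem.Str.strip ln], true) := by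
          simp only [pvStepA, Bool.not_false, Bool.and_true, hends, hstarts,
            Bool.false_eq_true, if_false, if_true, List.nil_append]
        rw [hstep, pvFoldA_started]
        simp [hp]
      · have hp' : pvStartsBody (PySem.Str.strip ln) = false := by
          simpa using hp
        have hstep : pvStepA ([], false) ln = ([], false) := by
          by_cases he : PySem.Str.endswith (PySem.Str.strip ln) ":" = true
          · simp only [pvStepA, Bool.not_false, Bool.and_true, he, if_true]
          · have he' : PySem.Str.endswith (PySem.Str.strip ln) ":" = false := by simpa using he
            have hs : (PySem.Str.startswith (PySem.Str.strip ln) "Hey"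
                || PySem.Str.startswith (PySem.Str.strip ln) "Hi") = false := by
              have := hp'
              simp only [pvStartsBody, he'] at this
              simpa using this
            simp only [pvStepA, Bool.not_false, Bool.and_true, he', hs,
              Bool.false_eq_true, if_false]
        rw [hstep, ih]
        simp only [hp', cond_false]
        cases h : (L.map PySem.Str.strip).findIdx? pvStartsBody with
        | none => simp [h]
        | some i => simp [h]

-- ===== VERDICT (by name: the statement is the Claim_ definition above) =====
theorem parse_followup_email_spec : Claim_equal_parse_followup_email := by
  intro s _
  unfold Spec_parse_followup_email parse_followup_email parse_followup_email_alt
  simp only [pvFoldA_notStarted]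
  cases h : ((((PySem.Str.split? (PySem.Str.strip s) "\n").getD [])).map PySem.Str.strip).findIdx? pvStartsBody with
  | none =>
      simp only [h]
      show PySem.Str.strip (PySem.Str.join "\n" []) = ""
      decide
  | some i => simp
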